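-- pv_equiv track=rewrite | github.com/FordPipatkittikul/Data-Structures-Algorithm | HashTables/recurringCharacter.py | first_recurring_character
-- ===== SOURCE A (Python) =====
-- def first_recurring_character(arrays):
--     num_and_distance = {}
--     distance = 0
--     for i in range (len(arrays)):
--         distance = 0
--         if(arrays[i] not in num_and_distance):
--             for j  in range (i + 1, len(arrays) ):
--                 distance += 1
--                 if(arrays[i] == arrays[j]):
--                     num_and_distance[arrays[i]] = distance
--                     break
--
--     if num_and_distance == {} :
--         return None
--
--     list_of_value = []
--     for key in num_and_distance:
--         list_of_value.append(num_and_distance[key])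
--
--     lowest_value = min(list_of_value)
--     for key in num_and_distance:
--         if num_and_distance[key] == lowest_value:
--             answer = key
--             break
--
--     return answer
-- ===== SOURCE B (Python) =====
-- def first_recurring_character(arrays):
--     # One pass: remember each value's first index; at every later occurrence
--     # form the candidate (gap, first_index, value) and keep the lexicographic
--     # minimum.  Min gap, ties broken by earliest first occurrence = A's answer.
--     first = {}
--     best = None
--     for i, x in enumerate(arrays):
--         if x in first:
--             cand = (i - first[x], first[x], x)
--             if best is None or cand < best:
--                 best = cand
--         else:
--             first[x] = i
--     return best[2] if best is not None else None
-- ===== Notes on version B (the rewrite author's own statement) =====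
-- stated objective: faster
-- what changed: A scans forward from every first occurrence to find the next duplicate (quadratic) and then post-processes a dict of gaps in two more passes; B is a single pass keeping a dict of first-seen indices and a running lexicographic minimum (gap, first index, value), so the inner forward scan and the post-processing passes disappear.
import Mathlib
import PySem

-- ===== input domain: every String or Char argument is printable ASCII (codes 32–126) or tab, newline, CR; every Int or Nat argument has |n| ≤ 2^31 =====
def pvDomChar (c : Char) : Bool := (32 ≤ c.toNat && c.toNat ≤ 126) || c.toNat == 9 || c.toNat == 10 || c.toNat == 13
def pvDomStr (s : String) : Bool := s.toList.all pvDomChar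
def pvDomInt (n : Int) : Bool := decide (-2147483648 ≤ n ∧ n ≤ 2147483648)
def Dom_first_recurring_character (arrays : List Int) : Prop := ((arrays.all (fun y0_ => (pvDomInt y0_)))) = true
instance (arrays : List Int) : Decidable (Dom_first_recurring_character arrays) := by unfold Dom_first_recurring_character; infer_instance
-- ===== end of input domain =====

-- B replaces A's quadratic forward-scan-per-first-occurrence by one pass with a dict of
-- first-seen indices and a running lexicographic minimum (gap, first index, value).

-- ===== PORT A =====
-- inner loop: for j in range(i+1, len(arrays)): distance += 1; if arrays[i]==arrays[j]: record distance, break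
def frcInnerA (arrays : List Int) (xi : Int) : List Int → Int → Option Int
  | [], _ => none
  | j :: js, distance =>
    if PySem.List.pyGetD arrays j 0 = xi then some (distance + 1)
    else frcInnerA arrays xi js (distance + 1)

-- outer loop: for i in range(len(arrays)): if arrays[i] not in dict, scan ahead and maybe insert
-- (indices drawn from range(len(arrays)) are always in range, so pyGetD's default is never used)
def frcOuterA (arrays : List Int) : List Int → PySem.Dict Int Int → PySem.Dict Int Int
  | [], d => d
  | i :: is, d =>
    let xi := PySem.List.pyGetD arrays i 0
    let d' :=
      if d.contains xi then d
      else
        match frcInnerA arrays xi (PySem.List.pyRange (i + 1) (arrays.length : Int) 1) 0 with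
        | some dist => d.insert xi dist
        | none => d
    frcOuterA arrays is d'

-- final loop: for key in dict: if dict[key] == lowest: answer = key; break
def frcPickA : List (Int × Int) → Int → Option Int
  | [], _ => none
  | (k, v) :: rest, m => if v = m then some k else frcPickA rest m

def first_recurring_character (arrays : List Int) : Option Int :=
  let d := frcOuterA arrays (PySem.List.pyRange 0 (arrays.length : Int) 1) PySem.Dict.empty
  if d.items = [] then none
  else
    -- list_of_value = [dict[key] for key in dict] = d.values; min of a nonempty list
    match PySem.List.min? d.values (fun v => v) with
    | none => none      -- unreachable: d is nonempty here
    | some lowest => frcPickA d.items lowest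

-- ===== PORT B =====
-- Python tuple comparison (a,b,c) < (d,e,f), lexicographic
def frcLt (p q : Int × Int × Int) : Bool :=
  decide (p.1 < q.1) || (p.1 == q.1 && (decide (p.2.1 < q.2.1) || (p.2.1 == q.2.1 && decide (p.2.2 < q.2.2))))

-- for i, x in enumerate(arrays): if x in first: update best else first[x] = i
def frcLoopB : List (Int × Int) → PySem.Dict Int Int → Option (Int × Int × Int) → Option (Int × Int × Int)
  | [], _, best => best
  | (i, x) :: rest, first, best =>
    match first.get? x with
    | some f =>
      let cand := (i - f, f, x)
      let best' :=
        match best with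
        | none => some cand
        | some b => if frcLt cand b then some cand else some b
      frcLoopB rest first best'
    | none => frcLoopB rest (first.insert x i) best

def first_recurring_character_alt (arrays : List Int) : Option Int :=
  (frcLoopB (PySem.List.enumerate arrays 0) PySem.Dict.empty none).map (fun b => b.2.2)

-- ===== PRECONDITION & SPEC =====
def Spec_first_recurring_character (arrays : List Int) (out : Option Int) : Prop := out = first_recurring_character_alt arrays
instance (arrays : List Int) (out : Option Int) : Decidable (Spec_first_recurring_character arrays out) := by unfold Spec_first_recurring_character; infer_instance

-- ===== CLAIM (what is proved, stated in full; the proofs are below) =====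
def Claim_equal_first_recurring_character : Prop := ∀ (arrays : List Int), Dom_first_recurring_character arrays → Spec_first_recurring_character arrays (first_recurring_character arrays)

-- ===== LEMMAS AND PROOFS =====

-- arrays[i] as a total function (only used at in-range indices)
def frcElt (arrays : List Int) (i : Nat) : Int := arrays.getD i 0

-- first index of x in arrays (length if absent)
def frcF (arrays : List Int) (x : Int) : Nat := arrays.findIdx (fun y => y == x)

-- gap from first occurrence i to the next occurrence of arrays[i], if any
def frcGap (arrays : List Int) (i : Nat) : Option Int :=
  match (arrays.drop (i + 1)).findIdx? (fun y => y == frcElt arrays i) with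
  | some t => some ((t : Int) + 1)
  | none => none

-- entry A's dict gains at step i (value, gap), if any
def frcCand (arrays : List Int) (i : Nat) : Option (Int × Int) :=
  if frcElt arrays i ∈ arrays.take i then none
  else (frcGap arrays i).map (fun g => (frcElt arrays i, g))

def frcCandList (arrays : List Int) (k : Nat) : List (Int × Int) :=
  (List.range k).filterMap (frcCand arrays)

-- the candidate triple B forms at a repeat occurrence i
def frcEv (arrays : List Int) (i : Nat) : Option (Int × Int × Int) :=
  if frcElt arrays i ∈ arrays.take i then
    some ((i : Int) - (frcF arrays (frcElt arrays i) : Int), ((frcF arrays (frcElt arrays i) : Int), frcElt arrays i))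
  else none

def frcEvFrom (arrays : List Int) (k : Nat) : List (Int × Int × Int) :=
  (List.range' k (arrays.length - k)).filterMap (frcEv arrays)

-- A's dict entries enriched with their first-occurrence index, as triples (gap, first, value)
def frcTrip (arrays : List Int) (i : Nat) : Option (Int × Int × Int) :=
  (frcCand arrays i).map (fun p => (p.2, ((i : Int), p.1)))

def frcTripList (arrays : List Int) : List (Int × Int × Int) :=
  (List.range arrays.length).filterMap (frcTrip arrays)

def frcStep (best : Option (Int × Int × Int)) (c : Int × Int × Int) : Option (Int × Int × Int) :=
  match best with
  | none => some c
  | some b => if frcLt c b then some c else some b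

def frcFold (l : List (Int × Int × Int)) (best : Option (Int × Int × Int)) : Option (Int × Int × Int) :=
  l.foldl frcStep best

-- ---- order lemmas about frcLt ----
lemma frcLt_irrefl (p : Int × Int × Int) : frcLt p p = false := by
  rcases p with ⟨a, b, c⟩; simp [frcLt]

lemma frcLt_antisymm {p q : Int × Int × Int} (h1 : frcLt p q = false) (h2 : frcLt q p = false) : p = q := by
  rcases p with ⟨a, b, c⟩; rcases q with ⟨d, e, f⟩
  simp only [frcLt, Bool.or_eq_false_iff, Bool.and_eq_false_iff, decide_eq_false_iff_not,
    beq_eq_false_iff_ne, ne_eq, Prod.mk.injEq] at h1 h2 ⊢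
  refine ⟨by omega, by omega, by omega⟩

lemma frcLt_trans_false {p q r : Int × Int × Int} (h1 : frcLt q p = false) (h2 : frcLt r q = false) : frcLt r p = false := by
  rcases p with ⟨a, b, c⟩; rcases q with ⟨d, e, f⟩; rcases r with ⟨g, h, i⟩
  simp only [frcLt, Bool.or_eq_false_iff, Bool.and_eq_false_iff, decide_eq_false_iff_not,
    beq_eq_false_iff_ne, ne_eq] at h1 h2 ⊢
  omega

lemma frcLt_false_of {c b m : Int × Int × Int} (h1 : frcLt c b = true) (h2 : frcLt c m = false) : frcLt b m = false := by
  rcases c with ⟨a1, a2, a3⟩; rcases b with ⟨b1, b2, b3⟩; rcases m with ⟨m1, m2, m3⟩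
  simp only [frcLt, Bool.or_eq_false_iff, Bool.and_eq_false_iff, decide_eq_false_iff_not,
    beq_eq_false_iff_ne, ne_eq, Bool.or_eq_true, Bool.and_eq_true, decide_eq_true_eq,
    beq_iff_eq] at h1 h2 ⊢
  omega

lemma frcLt_fst_le {p q : Int × Int × Int} (h : frcLt q p = false) : p.1 ≤ q.1 := by
  rcases p with ⟨a, b, c⟩; rcases q with ⟨d, e, f⟩
  simp only [frcLt, Bool.or_eq_false_iff, Bool.and_eq_false_iff, decide_eq_false_iff_not,
    beq_eq_false_iff_ne, ne_eq] at h
  omega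

lemma frcLt_eq_false_of_ne_true {p q : Int × Int × Int} (h : ¬ frcLt p q = true) : frcLt p q = false := by
  cases hpq : frcLt p q
  · rfl
  · exact absurd hpq h

-- ---- fold-minimum spec ----
lemma frcFold_some (l : List (Int × Int × Int)) : ∀ b, ∃ m, frcFold l (some b) = some m := by
  induction l with
  | nil => intro b; exact ⟨b, rfl⟩
  | cons c t ih =>
      intro b
      show ∃ m, frcFold t (frcStep (some b) c) = some m
      simp only [frcStep]
      split
      · exact ih c
      · exact ih b

lemma frcFold_none {l : List (Int × Int × Int)} (h : frcFold l none = none) : l = [] := by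
  cases l with
  | nil => rfl
  | cons c t =>
      exfalso
      have heq : frcFold (c :: t) none = frcFold t (some c) := rfl
      rw [heq] at h
      obtain ⟨m, hm⟩ := frcFold_some t c
      rw [hm] at h
      simp at h

lemma frcFold_spec (l : List (Int × Int × Int)) : ∀ (best : Option (Int × Int × Int)) (m : Int × Int × Int),
    frcFold l best = some m →
    (m ∈ l ∨ best = some m) ∧ (∀ u ∈ l, frcLt u m = false) ∧ (∀ b, best = some b → frcLt b m = false) := by
  induction l with
  | nil =>
      intro best m h
      refine ⟨Or.inr h, by simp, ?_⟩
      intro b hb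
      rw [hb] at h
      have hbm : b = m := by
        have : frcFold [] (some b) = some b := rfl
        rw [this] at h
        exact Option.some_inj.mp h
      subst hbm
      exact frcLt_irrefl b
  | cons c t ih =>
      intro best m h
      have h' : frcFold t (frcStep best c) = some m := h
      obtain ⟨hmem, hmin, hbest⟩ := ih _ m h'
      have hcm : frcLt c m = false := by
        cases best with
        | none => exact hbest c rfl
        | some b0 =>
            by_cases hlt : frcLt c b0 = true
            · exact hbest c (by simp [frcStep, hlt])
            · have hlt' : frcLt c b0 = false := frcLt_eq_false_of_ne_true hlt
              have hb0m : frcLt b0 m = false := hbest b0 (by simp [frcStep, hlt'])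
              exact frcLt_trans_false hb0m hlt'
      refine ⟨?_, ?_, ?_⟩
      · rcases hmem with hm | hm
        · exact Or.inl (List.mem_cons_of_mem _ hm)
        · cases best with
          | none =>
              have : c = m := by
                have hstep : frcStep none c = some c := rfl
                rw [hstep] at hm
                exact Option.some_inj.mp hm
              exact Or.inl (by rw [← this]; exact List.mem_cons_self)
          | some b0 =>
              by_cases hlt : frcLt c b0 = true
              · have hstep : frcStep (some b0) c = some c := by simp [frcStep, hlt]
                rw [hstep] at hm
                have : c = m := Option.some_inj.mp hm
                exact Or.inl (by rw [← this]; exact List.mem_cons_self)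
              · have hlt' : frcLt c b0 = false := frcLt_eq_false_of_ne_true hlt
                have hstep : frcStep (some b0) c = some b0 := by simp [frcStep, hlt']
                rw [hstep] at hm
                exact Or.inr hm
      · intro u hu
        rcases List.mem_cons.mp hu with rfl | hu
        · exact hcm
        · exact hmin u hu
      · intro b hb'
        subst hb'
        by_cases hlt : frcLt c b = true
        · exact frcLt_false_of hlt hcm
        · have hlt' : frcLt c b = false := frcLt_eq_false_of_ne_true hlt
          exact hbest b (by simp [frcStep, hlt'])

-- ---- findIdx / first-occurrence facts ----
lemma frcF_lt_length_of_mem {arrays : List Int} {x : Int} (h : x ∈ arrays) :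
    frcF arrays x < arrays.length := by
  apply List.findIdx_lt_length.mpr
  exact ⟨x, h, by simp⟩

lemma frcF_le {arrays : List Int} {x : Int} {j : Nat} (hj : j < arrays.length)
    (hx : arrays[j] = x) : frcF arrays x ≤ j := by
  by_contra hlt
  push_neg at hlt
  have hne := List.not_of_lt_findIdx (p := fun y => y == x) (xs := arrays) (i := j) hlt
  simp only [beq_eq_false_iff_ne, ne_eq] at hne
  exact hne hx

lemma frcF_lt_of_mem_take {arrays : List Int} {x : Int} {k : Nat} (h : x ∈ arrays.take k) :
    frcF arrays x < k ∧ frcF arrays x < arrays.length ∧ arrays.getD (frcF arrays x) 0 = x ∧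
      x ∉ arrays.take (frcF arrays x) := by
  obtain ⟨j, hj, hjx⟩ := List.mem_take_iff_getElem.mp h
  have hjlen : j < arrays.length := lt_of_lt_of_le hj (min_le_right _ _)
  have hjk : j < k := lt_of_lt_of_le hj (min_le_left _ _)
  have hFlen : frcF arrays x < arrays.length :=
    frcF_lt_length_of_mem (List.mem_of_mem_take h)
  have hFle : frcF arrays x ≤ j := frcF_le hjlen hjx
  have hget : arrays[frcF arrays x]'hFlen = x := by
    have := List.findIdx_getElem (p := fun y => y == x) (xs := arrays) (w := hFlen)
    simpa using this
  refine ⟨lt_of_le_of_lt hFle hjk, hFlen, ?_, ?_⟩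
  · rw [List.getD_eq_getElem arrays 0 hFlen, hget]
  · intro hmem
    obtain ⟨j', hj', hj'x⟩ := List.mem_take_iff_getElem.mp hmem
    have hj'F : j' < frcF arrays x := lt_of_lt_of_le hj' (min_le_left _ _)
    have hne := List.not_of_lt_findIdx (p := fun y => y == x) (xs := arrays) hj'F
    simp only [beq_eq_false_iff_ne, ne_eq] at hne
    exact hne hj'x

lemma frcF_eq_of_not_take {arrays : List Int} {x : Int} {k : Nat} (hk : k < arrays.length)
    (hx : arrays.getD k 0 = x) (h : x ∉ arrays.take k) : frcF arrays x = k := by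
  have hxk : arrays[k] = x := by rw [← List.getD_eq_getElem arrays 0 hk]; exact hx
  have hle : frcF arrays x ≤ k := frcF_le hk hxk
  rcases lt_or_eq_of_le hle with hlt | heq
  · exfalso
    apply h
    apply List.mem_take_iff_getElem.mpr
    have hFlen : frcF arrays x < arrays.length := lt_trans hlt hk
    have hget : arrays[frcF arrays x]'hFlen = x := by
      have := List.findIdx_getElem (p := fun y => y == x) (xs := arrays) (w := hFlen)
      simpa using this
    exact ⟨frcF arrays x, by omega, hget⟩
  · exact heq

lemma mem_take_of_getD {arrays : List Int} {i k : Nat} (hik : i < k) (hi : i < arrays.length) :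
    arrays.getD i 0 ∈ arrays.take k := by
  apply List.mem_take_iff_getElem.mpr
  exact ⟨i, by omega, (List.getD_eq_getElem arrays 0 hi).symm⟩

-- ---- frcGap rewriting helpers ----
lemma frcGap_of_none {arrays : List Int} {i : Nat}
    (h : (arrays.drop (i + 1)).findIdx? (fun y => y == frcElt arrays i) = none) :
    frcGap arrays i = none := by
  unfold frcGap; rw [h]

lemma frcGap_of_some {arrays : List Int} {i : Nat} {t : Nat}
    (h : (arrays.drop (i + 1)).findIdx? (fun y => y == frcElt arrays i) = some t) :
    frcGap arrays i = some ((t : Int) + 1) := by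
  unfold frcGap; rw [h]

-- gap exists at a first occurrence which recurs
lemma frcGap_isSome {arrays : List Int} {f j : Nat} (hfj : f < j) (hj : j < arrays.length)
    (hx : arrays.getD j 0 = frcElt arrays f) : (frcGap arrays f).isSome := by
  have hex : ((arrays.drop (f + 1)).findIdx? (fun y => y == frcElt arrays f)).isSome = true := by
    rw [List.findIdx?_isSome, List.any_eq_true]
    have hje : arrays[j] = frcElt arrays f := by
      rw [← List.getD_eq_getElem arrays 0 hj]; exact hx
    refine ⟨arrays[j], ?_, by simp [hje]⟩
    apply List.mem_iff_getElem.mpr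
    have hlen : j - (f + 1) < (arrays.drop (f + 1)).length := by
      rw [List.length_drop]; omega
    refine ⟨j - (f + 1), hlen, ?_⟩
    rw [List.getElem_drop]
    congr 1; omega
  obtain ⟨t, ht⟩ := Option.isSome_iff_exists.mp hex
  rw [frcGap_of_some ht]
  rfl

-- the gap found is minimal: at most j - f for any later occurrence j
lemma frcGap_le {arrays : List Int} {f j : Nat} {g : Int} (hfj : f < j) (hj : j < arrays.length)
    (hx : arrays.getD j 0 = frcElt arrays f) (hg : frcGap arrays f = some g) :
    1 ≤ g ∧ g ≤ (j : Int) - (f : Int) := by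
  cases ht : (arrays.drop (f + 1)).findIdx? (fun y => y == frcElt arrays f) with
  | none => rw [frcGap_of_none ht] at hg; simp at hg
  | some t =>
      rw [frcGap_of_some ht] at hg
      have hgt : (t : Int) + 1 = g := Option.some_inj.mp hg
      obtain ⟨htlen, hpt, hmin⟩ := List.findIdx?_eq_some_iff_getElem.mp ht
      have hm : j - (f + 1) < (arrays.drop (f + 1)).length := by
        rw [List.length_drop]; omega
      have hpm : ((arrays.drop (f + 1))[j - (f + 1)]'hm == frcElt arrays f) = true := by
        have he : (arrays.drop (f + 1))[j - (f + 1)]'hm = arrays[j] := by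
          rw [List.getElem_drop]; congr 1; omega
        rw [he]
        have hje : arrays[j] = frcElt arrays f := by
          rw [← List.getD_eq_getElem arrays 0 hj]; exact hx
        simp [hje]
      have htle : t ≤ j - (f + 1) := by
        by_contra hcon
        push_neg at hcon
        exact (hmin _ hcon) hpm
      omega

-- the gap points at an actual occurrence
lemma frcGap_occ {arrays : List Int} {f : Nat} {g : Int} (hf : f < arrays.length)
    (hg : frcGap arrays f = some g) :
    ∃ j : Nat, (j : Int) = (f : Int) + g ∧ f < j ∧ j < arrays.length ∧
      arrays.getD j 0 = frcElt arrays f := by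
  cases ht : (arrays.drop (f + 1)).findIdx? (fun y => y == frcElt arrays f) with
  | none => rw [frcGap_of_none ht] at hg; simp at hg
  | some t =>
      rw [frcGap_of_some ht] at hg
      have hgt : (t : Int) + 1 = g := Option.some_inj.mp hg
      obtain ⟨htlen, hpt, _⟩ := List.findIdx?_eq_some_iff_getElem.mp ht
      have htlen' : t < arrays.length - (f + 1) := by
        rw [List.length_drop] at htlen; omega
      refine ⟨f + 1 + t, by push_cast; omega, by omega, by omega, ?_⟩
      have hjl : f + 1 + t < arrays.length := by omega
      rw [List.getD_eq_getElem arrays 0 hjl]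
      have he : (arrays.drop (f + 1))[t]'htlen = arrays[f + 1 + t]'hjl := List.getElem_drop
      rw [he] at hpt
      exact eq_of_beq hpt

-- ---- frcCand rewriting helpers ----
lemma frcCand_of_mem {arrays : List Int} {i : Nat} (h : frcElt arrays i ∈ arrays.take i) :
    frcCand arrays i = none := by
  unfold frcCand; rw [if_pos h]

lemma frcCand_of_gap_none {arrays : List Int} {i : Nat} (h : frcElt arrays i ∉ arrays.take i)
    (hg : frcGap arrays i = none) : frcCand arrays i = none := by
  unfold frcCand; rw [if_neg h, hg]; rfl

lemma frcCand_of_gap_some {arrays : List Int} {i : Nat} {g : Int} (h : frcElt arrays i ∉ arrays.take i)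
    (hg : frcGap arrays i = some g) : frcCand arrays i = some (frcElt arrays i, g) := by
  unfold frcCand; rw [if_neg h, hg]; rfl

lemma frcCand_eq_some {arrays : List Int} {i : Nat} {p : Int × Int} (h : frcCand arrays i = some p) :
    frcElt arrays i ∉ arrays.take i ∧ frcGap arrays i = some p.2 ∧ p.1 = frcElt arrays i := by
  by_cases hmem : frcElt arrays i ∈ arrays.take i
  · rw [frcCand_of_mem hmem] at h; simp at h
  · cases hg : frcGap arrays i with
    | none => rw [frcCand_of_gap_none hmem hg] at h; simp at h
    | some g =>
        rw [frcCand_of_gap_some hmem hg] at h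
        have hp : (frcElt arrays i, g) = p := Option.some_inj.mp h
        refine ⟨hmem, ?_, ?_⟩
        · rw [← hp]
        · rw [← hp]

lemma frcTrip_eq_some {arrays : List Int} {i : Nat} {t : Int × Int × Int}
    (h : frcTrip arrays i = some t) :
    frcElt arrays i ∉ arrays.take i ∧ frcGap arrays i = some t.1 ∧ t.2.1 = (i : Int) ∧
      t.2.2 = frcElt arrays i := by
  unfold frcTrip at h
  cases hc : frcCand arrays i with
  | none => rw [hc] at h; simp at h
  | some p =>
      rw [hc] at h
      simp only [Option.map_some, Option.some.injEq] at h
      obtain ⟨hn, hg, hp1⟩ := frcCand_eq_some hc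
      subst h
      exact ⟨hn, hg, rfl, hp1⟩

lemma frcTrip_of_cand {arrays : List Int} {i : Nat} {g : Int}
    (h : frcElt arrays i ∉ arrays.take i) (hg : frcGap arrays i = some g) :
    frcTrip arrays i = some (g, ((i : Int), frcElt arrays i)) := by
  unfold frcTrip
  rw [frcCand_of_gap_some h hg]
  rfl

-- ---- A's inner scan ----
lemma frcInnerA_eq (arrays : List Int) (xi : Int) (l : List Int) : ∀ (c : Int),
    frcInnerA arrays xi l c =
      (l.findIdx? (fun j => PySem.List.pyGetD arrays j 0 == xi)).map (fun (t : Nat) => c + (t : Int) + 1) := by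
  induction l with
  | nil => intro c; simp [frcInnerA]
  | cons j js ih =>
      intro c
      rw [List.findIdx?_cons]
      by_cases hj : PySem.List.pyGetD arrays j 0 = xi
      · simp [frcInnerA, hj]
      · have hj' : (PySem.List.pyGetD arrays j 0 == xi) = false := by simp [hj]
        rw [frcInnerA, if_neg hj, hj']
        simp only [Bool.false_eq_true, if_false]
        rw [ih (c + 1)]
        cases h : js.findIdx? (fun j => PySem.List.pyGetD arrays j 0 == xi) with
        | none => simp
        | some t =>
            show some (c + 1 + (t : Int) + 1) = some (c + ((t + 1 : Nat) : Int) + 1)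
            congr 1
            push_cast
            ring

lemma frcInnerA_gap (arrays : List Int) (k : Nat) (hk : k < arrays.length) :
    frcInnerA arrays (frcElt arrays k) (PySem.List.pyRange ((k : Int) + 1) (arrays.length : Int) 1) 0 =
      frcGap arrays k := by
  rw [frcInnerA_eq]
  have hmap := PySem.List.map_pyGetD_pyRange' arrays 0 (a := (k : Int) + 1) (by positivity)
  have hfi : (PySem.List.pyRange ((k : Int) + 1) (arrays.length : Int) 1).findIdx?
      (fun j => PySem.List.pyGetD arrays j 0 == frcElt arrays k)
      = (arrays.drop (k + 1)).findIdx? (fun y => y == frcElt arrays k) := by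
    have h1 : (PySem.List.pyRange ((k : Int) + 1) (arrays.length : Int) 1).findIdx?
        (fun j => PySem.List.pyGetD arrays j 0 == frcElt arrays k)
        = ((PySem.List.pyRange ((k : Int) + 1) (arrays.length : Int) 1).map
            (fun j => PySem.List.pyGetD arrays j 0)).findIdx? (fun y => y == frcElt arrays k) := by
      rw [List.findIdx?_map]; rfl
    rw [h1, hmap]
    congr 1
  rw [hfi]
  cases h : (arrays.drop (k + 1)).findIdx? (fun y => y == frcElt arrays k) with
  | none => rw [frcGap_of_none h]; rfl
  | some t => rw [frcGap_of_some h]; simp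

-- ---- A's dict ----
lemma frcCandList_keys {arrays : List Int} {k : Nat} (hkn : k < arrays.length) :
    (frcElt arrays k ∈ (frcCandList arrays k).map (fun p => p.1)) ↔ frcElt arrays k ∈ arrays.take k := by
  constructor
  · intro h
    simp only [frcCandList, List.mem_map, List.mem_filterMap, List.mem_range] at h
    obtain ⟨p, ⟨i, hik, hci⟩, hp1⟩ := h
    obtain ⟨_, _, hp1'⟩ := frcCand_eq_some hci
    have : frcElt arrays i = frcElt arrays k := by rw [← hp1', hp1]
    rw [← this]
    exact mem_take_of_getD hik (by omega)
  · intro h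
    obtain ⟨hFk, hFlen, hFget, hFnt⟩ := frcF_lt_of_mem_take h
    have hxf : frcElt arrays (frcF arrays (frcElt arrays k)) = frcElt arrays k := hFget
    have hgap : (frcGap arrays (frcF arrays (frcElt arrays k))).isSome := by
      apply frcGap_isSome (j := k) hFk hkn
      rw [hxf]; rfl
    obtain ⟨g, hg⟩ := Option.isSome_iff_exists.mp hgap
    simp only [frcCandList, List.mem_map, List.mem_filterMap, List.mem_range]
    refine ⟨(frcElt arrays k, g), ⟨frcF arrays (frcElt arrays k), hFk, ?_⟩, rfl⟩
    rw [frcCand_of_gap_some (by rw [hxf]; exact hFnt) hg, hxf]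

lemma frcOuterA_aux (arrays : List Int) : ∀ (m k : Nat) (d : PySem.Dict Int Int),
    arrays.length - k = m → k ≤ arrays.length → d.items = frcCandList arrays k →
    (frcOuterA arrays (PySem.List.pyRange (k : Int) (arrays.length : Int) 1) d).items =
      frcCandList arrays arrays.length := by
  intro m
  induction m with
  | zero =>
      intro k d hm hk hd
      have hk' : k = arrays.length := by omega
      subst hk'
      rw [PySem.List.pyRange_one_eq_nil (le_refl _)]
      simpa [frcOuterA] using hd
  | succ m ih =>
      intro k d hm hk hd
      have hkn : k < arrays.length := by omega
      have hlt : (k : Int) < (arrays.length : Int) := by exact_mod_cast hkn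
      rw [PySem.List.pyRange_one_cons hlt]
      have hcast : (k : Int) + 1 = ((k + 1 : Nat) : Int) := by push_cast; ring
      have hxi : PySem.List.pyGetD arrays (k : Int) 0 = frcElt arrays k := by
        rw [PySem.List.pyGetD_natCast]; rfl
      have hkeys : d.keys = (frcCandList arrays k).map (fun p => p.1) := by
        show d.items.map _ = _
        rw [hd]
      have hcont : d.contains (frcElt arrays k) =
          decide (frcElt arrays k ∈ arrays.take k) := by
        rw [PySem.Dict.contains_eq_decide_mem_keys, hkeys]
        simp only [decide_eq_decide]
        exact frcCandList_keys hkn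
      show (frcOuterA arrays ((k : Int) :: PySem.List.pyRange ((k : Int) + 1) (arrays.length : Int) 1) d).items = _
      rw [frcOuterA]
      simp only [hxi]
      by_cases hmem : frcElt arrays k ∈ arrays.take k
      · rw [hcont, decide_eq_true hmem]
        simp only [if_true]
        rw [hcast]
        apply ih (k + 1) d (by omega) (by omega)
        rw [hd]
        unfold frcCandList
        rw [List.range_succ, List.filterMap_append]
        simp [frcCand_of_mem hmem]
      · rw [hcont, decide_eq_false hmem]
        simp only [Bool.false_eq_true, if_false]
        rw [frcInnerA_gap arrays k hkn]
        cases hg : frcGap arrays k with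
        | none =>
            rw [hcast]
            apply ih (k + 1) d (by omega) (by omega)
            rw [hd]
            unfold frcCandList
            rw [List.range_succ, List.filterMap_append]
            simp [frcCand_of_gap_none hmem hg]
        | some g =>
            rw [hcast]
            apply ih (k + 1) (d.insert (frcElt arrays k) g) (by omega) (by omega)
            rw [PySem.Dict.items_insert_of_not_contains d g
              (by rw [hcont, decide_eq_false hmem]), hd]
            unfold frcCandList
            rw [List.range_succ, List.filterMap_append]
            simp [frcCand_of_gap_some hmem hg]

-- ---- B's loop ----
lemma frcEvFrom_succ (arrays : List Int) (k : Nat) (hkn : k < arrays.length) :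
    frcEvFrom arrays k = (frcEv arrays k).toList ++ frcEvFrom arrays (k + 1) := by
  unfold frcEvFrom
  have h1 : arrays.length - k = (arrays.length - (k + 1)) + 1 := by omega
  rw [h1, List.range'_succ, List.filterMap_cons]
  cases h : frcEv arrays k with
  | none => simp
  | some ev => simp

lemma frcLoopB_aux (arrays : List Int) : ∀ (m k : Nat) (d : PySem.Dict Int Int)
    (best : Option (Int × Int × Int)), arrays.length - k = m → k ≤ arrays.length →
    (∀ x f, d.get? x = some f ↔ (x ∈ arrays.take k ∧ f = (frcF arrays x : Int))) →
    frcLoopB (PySem.List.enumerate (arrays.drop k) (k : Int)) d best =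
      frcFold (frcEvFrom arrays k) best := by
  intro m
  induction m with
  | zero =>
      intro k d best hm hk hd
      have hk' : k = arrays.length := by omega
      subst hk'
      rw [List.drop_length]
      simp [PySem.List.enumerate, frcLoopB, frcEvFrom, frcFold]
  | succ m ih =>
      intro k d best hm hk hd
      have hkn : k < arrays.length := by omega
      have hx : frcElt arrays k = arrays[k] := List.getD_eq_getElem arrays 0 hkn
      rw [List.drop_eq_getElem_cons hkn, PySem.List.enumerate_cons]
      rw [frcLoopB]
      have hcast : (k : Int) + 1 = ((k + 1 : Nat) : Int) := by push_cast; ring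
      have htk : arrays.take (k + 1) = arrays.take k ++ [arrays[k]] := by
        rw [List.take_succ, List.getElem?_eq_getElem hkn]; rfl
      cases hget : d.get? arrays[k] with
      | some f =>
          obtain ⟨hmem, hf⟩ := (hd arrays[k] f).mp hget
          have hmem' : frcElt arrays k ∈ arrays.take k := by rw [hx]; exact hmem
          have hev : frcEv arrays k =
              some ((k : Int) - (frcF arrays arrays[k] : Int),
                ((frcF arrays arrays[k] : Int), arrays[k])) := by
            unfold frcEv
            rw [if_pos hmem', hx]
          rw [frcEvFrom_succ arrays k hkn, hev]
          simp only [Option.toList_some, List.singleton_append]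
          have hfold : frcFold ((((k : Int) - (frcF arrays arrays[k] : Int),
              ((frcF arrays arrays[k] : Int), arrays[k]))) :: frcEvFrom arrays (k + 1)) best =
              frcFold (frcEvFrom arrays (k + 1))
                (frcStep best ((k : Int) - (frcF arrays arrays[k] : Int),
                  ((frcF arrays arrays[k] : Int), arrays[k]))) := rfl
          rw [hfold, hcast, hf]
          have hd' : ∀ y f', d.get? y = some f' ↔
              (y ∈ arrays.take (k + 1) ∧ f' = (frcF arrays y : Int)) := by
            intro y f'
            rw [hd y f', htk]
            constructor
            · rintro ⟨hy, hfy⟩; exact ⟨List.mem_append_left _ hy, hfy⟩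
            · rintro ⟨hy, hfy⟩
              rcases List.mem_append.mp hy with hy | hy
              · exact ⟨hy, hfy⟩
              · rw [List.mem_singleton] at hy
                subst hy; exact ⟨hmem, hfy⟩
          exact ih (k + 1) d _ (by omega) (by omega) hd'
      | none =>
          have hnot : arrays[k] ∉ arrays.take k := by
            intro hmem
            have hcontra := (hd arrays[k] (frcF arrays arrays[k] : Int)).mpr ⟨hmem, rfl⟩
            rw [hget] at hcontra
            simp at hcontra
          have hnot' : frcElt arrays k ∉ arrays.take k := by rw [hx]; exact hnot
          have hev : frcEv arrays k = none := by
            unfold frcEv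
            rw [if_neg hnot']
          rw [frcEvFrom_succ arrays k hkn, hev]
          simp only [Option.toList_none, List.nil_append]
          rw [hcast]
          have hFk : frcF arrays arrays[k] = k :=
            frcF_eq_of_not_take hkn (List.getD_eq_getElem arrays 0 hkn) hnot
          apply ih (k + 1) (d.insert arrays[k] (k : Int)) best (by omega) (by omega)
          intro y f'
          rw [PySem.Dict.get?_insert, htk]
          by_cases hy : y = arrays[k]
          · subst hy
            rw [if_pos rfl, hFk]
            constructor
            · intro hsome
              refine ⟨List.mem_append_right _ (List.mem_singleton.mpr rfl), ?_⟩
              exact (Option.some_inj.mp hsome).symm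
            · rintro ⟨_, hfy⟩; rw [hfy]
          · rw [if_neg hy, hd y f']
            constructor
            · rintro ⟨hmem, hfy⟩; exact ⟨List.mem_append_left _ hmem, hfy⟩
            · rintro ⟨hmem, hfy⟩
              rcases List.mem_append.mp hmem with hm' | hm'
              · exact ⟨hm', hfy⟩
              · exact absurd (List.mem_singleton.mp hm') hy

-- ---- relating the two minima ----
lemma mem_frcEvFrom_zero {arrays : List Int} {u : Int × Int × Int} :
    u ∈ frcEvFrom arrays 0 ↔ ∃ j : Nat, j < arrays.length ∧ frcEv arrays j = some u := by
  unfold frcEvFrom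
  rw [Nat.sub_zero, ← List.range_eq_range']
  simp [List.mem_filterMap, List.mem_range]

lemma mem_frcTripList {arrays : List Int} {t : Int × Int × Int} :
    t ∈ frcTripList arrays ↔ ∃ i : Nat, i < arrays.length ∧ frcTrip arrays i = some t := by
  unfold frcTripList
  simp [List.mem_filterMap, List.mem_range]

lemma frcTrip_mem_ev {arrays : List Int} {t : Int × Int × Int} (h : t ∈ frcTripList arrays) :
    t ∈ frcEvFrom arrays 0 := by
  obtain ⟨i, hi, hti⟩ := mem_frcTripList.mp h
  obtain ⟨hnmem, hgap, ht21, ht22⟩ := frcTrip_eq_some hti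
  obtain ⟨j, hjg, hij, hjlen, hjx⟩ := frcGap_occ hi hgap
  apply mem_frcEvFrom_zero.mpr
  refine ⟨j, hjlen, ?_⟩
  unfold frcEv
  have hxj : frcElt arrays j = frcElt arrays i := hjx
  have hmemj : frcElt arrays j ∈ arrays.take j := by
    rw [hxj]; exact mem_take_of_getD hij hi
  rw [if_pos hmemj, hxj]
  have hFi : frcF arrays (frcElt arrays i) = i := frcF_eq_of_not_take hi rfl hnmem
  rw [hFi]
  rcases t with ⟨g0, i0, x0⟩
  simp only at ht21 ht22
  have hg0 : (j : Int) - (i : Int) = g0 := by omega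
  rw [hg0, ht21, ht22]

lemma frcEv_dominated {arrays : List Int} {u : Int × Int × Int} (h : u ∈ frcEvFrom arrays 0) :
    ∃ t ∈ frcTripList arrays, frcLt u t = false := by
  obtain ⟨j, hj, hev⟩ := mem_frcEvFrom_zero.mp h
  have hinv : frcElt arrays j ∈ arrays.take j ∧
      u = ((j : Int) - (frcF arrays (frcElt arrays j) : Int),
        ((frcF arrays (frcElt arrays j) : Int), frcElt arrays j)) := by
    unfold frcEv at hev
    split at hev
    · exact ⟨by assumption, (Option.some_inj.mp hev).symm⟩
    · simp at hev
  obtain ⟨hmem, hu⟩ := hinv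
  obtain ⟨hFj, hFlen, hFget, hFnt⟩ := frcF_lt_of_mem_take hmem
  have hxf : frcElt arrays (frcF arrays (frcElt arrays j)) = frcElt arrays j := hFget
  have hFnt' : frcElt arrays (frcF arrays (frcElt arrays j)) ∉
      arrays.take (frcF arrays (frcElt arrays j)) := by
    rw [hxf]; exact hFnt
  have hgs : (frcGap arrays (frcF arrays (frcElt arrays j))).isSome := by
    apply frcGap_isSome (j := j) hFj hj
    rw [hxf]; rfl
  obtain ⟨g, hg⟩ := Option.isSome_iff_exists.mp hgs
  obtain ⟨hg1, hg2⟩ := frcGap_le (j := j) hFj hj (by rw [hxf]; rfl) hg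
  refine ⟨(g, ((frcF arrays (frcElt arrays j) : Int), frcElt arrays j)), ?_, ?_⟩
  · apply mem_frcTripList.mpr
    refine ⟨frcF arrays (frcElt arrays j), hFlen, ?_⟩
    rw [frcTrip_of_cand hFnt' hg, hxf]
  · rw [hu]
    simp only [frcLt, Bool.or_eq_false_iff, Bool.and_eq_false_iff, decide_eq_false_iff_not,
      beq_eq_false_iff_ne, ne_eq]
    omega

-- tripList second components strictly increase
lemma frcTripList_sorted (arrays : List Int) :
    (frcTripList arrays).Pairwise (fun a b => a.2.1 < b.2.1) := by
  unfold frcTripList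
  rw [List.pairwise_filterMap]
  apply List.Pairwise.imp ?_ (List.pairwise_lt_range)
  intro a b hab t hta t' htb'
  obtain ⟨_, _, hta21, _⟩ := frcTrip_eq_some hta
  obtain ⟨_, _, htb21, _⟩ := frcTrip_eq_some htb'
  rw [hta21, htb21]
  exact_mod_cast hab

lemma frcCandList_map (arrays : List Int) :
    frcCandList arrays arrays.length = (frcTripList arrays).map (fun t => (t.2.2, t.1)) := by
  unfold frcCandList frcTripList
  rw [List.map_filterMap]
  congr 1
  funext i
  unfold frcTrip
  cases h : frcCand arrays i with
  | none => simp
  | some p => simp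

lemma frcPickA_spec : ∀ (T : List (Int × Int × Int)) (m : Int × Int × Int),
    T.Pairwise (fun a b => a.2.1 < b.2.1) → m ∈ T → (∀ u ∈ T, frcLt u m = false) →
    frcPickA (T.map (fun t => (t.2.2, t.1))) m.1 = some m.2.2 := by
  intro T
  induction T with
  | nil => intro m _ hm _; exact absurd hm (List.not_mem_nil)
  | cons t T' ih =>
      intro m hs hm hmin
      rw [List.map_cons]
      show (if t.1 = m.1 then some t.2.2 else frcPickA (T'.map (fun t => (t.2.2, t.1))) m.1) = some m.2.2
      by_cases h1 : t.1 = m.1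
      · rw [if_pos h1]
        have htm : t = m := by
          rcases List.mem_cons.mp hm with rfl | hm'
          · rfl
          · exfalso
            have hlt : t.2.1 < m.2.1 := (List.pairwise_cons.mp hs).1 m hm'
            have hfalse := hmin t List.mem_cons_self
            rcases t with ⟨a, b, c⟩; rcases m with ⟨d, e, f⟩
            simp only [frcLt, Bool.or_eq_false_iff, Bool.and_eq_false_iff,
              decide_eq_false_iff_not, beq_eq_false_iff_ne, ne_eq] at hfalse
            simp only at h1 hlt
            omega
        rw [htm]
      · rw [if_neg h1]
        have hm' : m ∈ T' := by
          rcases List.mem_cons.mp hm with rfl | hm'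
          · exact absurd rfl h1
          · exact hm'
        exact ih m (List.pairwise_cons.mp hs).2 hm' (fun u hu => hmin u (List.mem_cons_of_mem _ hu))

-- ===== VERDICT (by name: the statement is the Claim_ definition above) =====
theorem first_recurring_character_spec : Claim_equal_first_recurring_character := by
  intro arrays _
  unfold Spec_first_recurring_character
  have hA : (frcOuterA arrays (PySem.List.pyRange 0 (arrays.length : Int) 1) PySem.Dict.empty).items
      = frcCandList arrays arrays.length := by
    have h0 : ((0 : Nat) : Int) = (0 : Int) := by norm_num
    rw [← h0]
    exact frcOuterA_aux arrays (arrays.length - 0) 0 PySem.Dict.empty rfl (Nat.zero_le _) rfl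
  have hB : frcLoopB (PySem.List.enumerate arrays 0) PySem.Dict.empty none
      = frcFold (frcEvFrom arrays 0) none := by
    have h0 : PySem.List.enumerate arrays 0 = PySem.List.enumerate (arrays.drop 0) ((0 : Nat) : Int) := by
      norm_num
    rw [h0]
    apply frcLoopB_aux arrays (arrays.length - 0) 0 PySem.Dict.empty none rfl (Nat.zero_le _)
    intro x f
    rw [PySem.Dict.get?_empty]
    simp
  unfold first_recurring_character first_recurring_character_alt
  rw [hB]
  cases hE : frcFold (frcEvFrom arrays 0) none with
  | none =>
      have hEnil : frcEvFrom arrays 0 = [] := frcFold_none hE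
      have hTnil : frcTripList arrays = [] := by
        cases hT : frcTripList arrays with
        | nil => rfl
        | cons t ts =>
            exfalso
            have hmem : t ∈ frcEvFrom arrays 0 :=
              frcTrip_mem_ev (by rw [hT]; exact List.mem_cons_self)
            rw [hEnil] at hmem
            exact absurd hmem (List.not_mem_nil)
      have hLnil : frcCandList arrays arrays.length = [] := by
        rw [frcCandList_map, hTnil]; rfl
      simp [hA, hLnil]
  | some mE =>
      obtain ⟨hmemE, hminE, _⟩ := frcFold_spec (frcEvFrom arrays 0) none mE hE
      have hmemE' : mE ∈ frcEvFrom arrays 0 := by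
        rcases hmemE with h | h
        · exact h
        · simp at h
      obtain ⟨t0, ht0, _⟩ := frcEv_dominated hmemE'
      have hTne : frcTripList arrays ≠ [] := by
        intro h; rw [h] at ht0; exact absurd ht0 (List.not_mem_nil)
      cases hP : frcFold (frcTripList arrays) none with
      | none => exact absurd (frcFold_none hP) hTne
      | some mP =>
          obtain ⟨hmemP, hminP, _⟩ := frcFold_spec (frcTripList arrays) none mP hP
          have hmemP' : mP ∈ frcTripList arrays := by
            rcases hmemP with h | h
            · exact h
            · simp at h
          have h1 : frcLt mP mE = false := hminE mP (frcTrip_mem_ev hmemP')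
          have h2 : frcLt mE mP = false := by
            obtain ⟨t, htT, htle⟩ := frcEv_dominated hmemE'
            exact frcLt_trans_false (hminP t htT) htle
          have hEP : mP = mE := frcLt_antisymm h1 h2
          have hitems : (frcOuterA arrays (PySem.List.pyRange 0 (arrays.length : Int) 1)
              PySem.Dict.empty).items = (frcTripList arrays).map (fun t => (t.2.2, t.1)) := by
            rw [hA, frcCandList_map]
          have hne : (frcTripList arrays).map (fun t => (t.2.2, t.1)) ≠ [] := by
            intro h
            exact hTne (List.map_eq_nil_iff.mp h)
          have hvalues : (frcOuterA arrays (PySem.List.pyRange 0 (arrays.length : Int) 1)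
              PySem.Dict.empty).values = (frcTripList arrays).map (fun t => t.1) := by
            show (frcOuterA arrays (PySem.List.pyRange 0 (arrays.length : Int) 1)
              PySem.Dict.empty).items.map (fun p => p.2) = _
            rw [hitems, List.map_map]
            rfl
          simp only [hitems, hvalues, Option.map_some]
          rw [if_neg hne]
          cases hmin : PySem.List.min? ((frcTripList arrays).map (fun t => t.1)) (fun v => v) with
          | none =>
              exfalso
              rw [PySem.List.min?_eq_none_iff] at hmin
              exact hne (by rw [List.map_eq_nil_iff.mp hmin]; rfl)
          | some lowest =>
              have hlmem := PySem.List.min?_mem hmin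
              have hlmin := PySem.List.min?_isMin hmin
              have hlow : lowest = mP.1 := by
                have ha : lowest ≤ mP.1 := hlmin mP.1 (List.mem_map_of_mem hmemP')
                obtain ⟨u, huT, hul⟩ := List.mem_map.mp hlmem
                have hb : mP.1 ≤ lowest := by
                  rw [← hul]
                  exact frcLt_fst_le (hminP u huT)
                omega
              show frcPickA ((frcTripList arrays).map (fun t => (t.2.2, t.1))) lowest = some mE.2.2
              rw [hlow]
              rw [frcPickA_spec (frcTripList arrays) mP (frcTripList_sorted arrays) hmemP' hminP]
              rw [hEP]
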